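-- pv_equiv track=rewrite | github.com/nolan-3/Latin-Poetry-Generator | processData2.py | deleteFirstLetter
-- ===== SOURCE A (Python) =====
-- def deleteFirstLetter(string):
--     newString = ''
--     searchingForFirstLetter = True
--     for i in range(0, len(string)):
--         if searchingForFirstLetter == True and string[i].isalpha():
--             searchingForFirstLetter = False
--             #only append characters after the first character
--         elif searchingForFirstLetter == False:
--             newString += string[i]
--     return newString
-- ===== SOURCE B (Python) =====
-- def deleteFirstLetter(string):
--     # Divide and conquer: if the left half contains a letter, the first letter
--     # lies there, so the answer is the recursive answer on the left half plus
--     # the whole right half; otherwise the answer comes from the right half.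
--     if len(string) <= 1:
--         return ''
--     mid = len(string) // 2
--     left, right = string[:mid], string[mid:]
--     if any(c.isalpha() for c in left):
--         return deleteFirstLetter(left) + right
--     return deleteFirstLetter(right)
-- ===== Notes on version B (the rewrite author's own statement) =====
-- stated objective: alternative
-- what changed: Replaces A's single left-to-right pass with a boolean flag and character-by-character appends by a divide-and-conquer recursion: split the string in half, recurse into the half that holds the first letter and concatenate the untouched right half in bulk.
import Mathlib
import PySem

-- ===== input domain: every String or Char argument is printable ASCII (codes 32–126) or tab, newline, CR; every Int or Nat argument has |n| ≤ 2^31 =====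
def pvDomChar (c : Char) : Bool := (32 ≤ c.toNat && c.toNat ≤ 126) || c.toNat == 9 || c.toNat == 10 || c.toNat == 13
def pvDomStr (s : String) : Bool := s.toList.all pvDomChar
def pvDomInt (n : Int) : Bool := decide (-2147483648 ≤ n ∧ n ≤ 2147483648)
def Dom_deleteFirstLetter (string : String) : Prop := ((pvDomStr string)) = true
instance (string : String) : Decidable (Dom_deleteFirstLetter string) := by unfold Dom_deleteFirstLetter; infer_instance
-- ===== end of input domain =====

-- B replaces A's flag-and-append loop by a divide-and-conquer recursion on string halves (alternative decomposition, same cost).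


-- ===== PORT A =====
-- A's loop with accumulator and searching flag, transliterated as structural recursion over the chars.
def goA_deleteFirstLetter : List Char → List Char → Bool → List Char
  | [], acc, _ => acc
  | c :: cs, acc, searching =>
    if searching = true && PySem.Chars.isalpha c then
      goA_deleteFirstLetter cs acc false
    else if searching = false then
      goA_deleteFirstLetter cs (acc ++ [c]) searching
    else
      goA_deleteFirstLetter cs acc searching

def deleteFirstLetter (string : String) : String :=
  String.mk (goA_deleteFirstLetter string.toList [] true)

-- ===== PORT B =====
-- B: divide and conquer — recurse into the half containing the first letter, keep the right half whole.
def goB_deleteFirstLetter (s : List Char) : List Char :=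
  if s.length ≤ 1 then []
  else if (s.take (s.length / 2)).any (fun c => PySem.Chars.isalpha c) then
    goB_deleteFirstLetter (s.take (s.length / 2)) ++ s.drop (s.length / 2)
  else
    goB_deleteFirstLetter (s.drop (s.length / 2))
termination_by s.length
decreasing_by
  · simp only [List.length_take]; omega
  · simp only [List.length_drop]; omega

def deleteFirstLetter_alt (string : String) : String :=
  String.mk (goB_deleteFirstLetter string.toList)

-- ===== PRECONDITION & SPEC =====
def Spec_deleteFirstLetter (string : String) (out : String) : Prop := out = deleteFirstLetter_alt string
instance (string : String) (out : String) : Decidable (Spec_deleteFirstLetter string out) := by unfold Spec_deleteFirstLetter; infer_instance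

-- ===== CLAIM (what is proved, stated in full; the proofs are below) =====
def Claim_equal_deleteFirstLetter : Prop := ∀ (string : String), Dom_deleteFirstLetter string → Spec_deleteFirstLetter string (deleteFirstLetter string)

-- ===== LEMMAS AND PROOFS =====
-- Canonical form both ports are reduced to: drop the non-alpha prefix, then drop the first letter.
def canon_deleteFirstLetter (s : List Char) : List Char :=
  (s.dropWhile (fun c => !PySem.Chars.isalpha c)).drop 1

theorem goA_false (cs : List Char) (acc : List Char) :
    goA_deleteFirstLetter cs acc false = acc ++ cs := by
  induction cs generalizing acc with
  | nil => simp [goA_deleteFirstLetter]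
  | cons c cs ih => simp [goA_deleteFirstLetter, ih]

theorem goA_canon (cs : List Char) :
    goA_deleteFirstLetter cs [] true = canon_deleteFirstLetter cs := by
  induction cs with
  | nil => simp [goA_deleteFirstLetter, canon_deleteFirstLetter]
  | cons c cs ih =>
    by_cases h : PySem.Chars.isalpha c
    · simp [goA_deleteFirstLetter, canon_deleteFirstLetter, h, List.dropWhile, goA_false]
    · simp [goA_deleteFirstLetter, canon_deleteFirstLetter, h, List.dropWhile] at ih ⊢
      exact ih

theorem canon_append (l r : List Char) :
    canon_deleteFirstLetter (l ++ r) =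
      if (l.any fun c => PySem.Chars.isalpha c) then canon_deleteFirstLetter l ++ r
      else canon_deleteFirstLetter r := by
  induction l with
  | nil => simp [canon_deleteFirstLetter]
  | cons c l ih =>
    by_cases hc : PySem.Chars.isalpha c
    · simp [canon_deleteFirstLetter, List.dropWhile, hc]
    · simp only [canon_deleteFirstLetter, List.cons_append, List.dropWhile, hc,
        Bool.not_false, if_true, List.any_cons, Bool.false_or] at ih ⊢
      exact ih

theorem goB_canon (s : List Char) :
    goB_deleteFirstLetter s = canon_deleteFirstLetter s := by
  induction s using goB_deleteFirstLetter.induct with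
  | case1 s h =>
    rw [goB_deleteFirstLetter]
    simp only [h, if_true]
    rcases s with _ | ⟨c, _ | _⟩
    · simp [canon_deleteFirstLetter]
    · by_cases hc : PySem.Chars.isalpha c <;>
        simp [canon_deleteFirstLetter, List.dropWhile, hc]
    · simp at h
  | case2 s h hany ih =>
    rw [goB_deleteFirstLetter]
    simp only [h, if_false, hany, if_true]
    rw [ih]
    have hx := canon_append (s.take (s.length / 2)) (s.drop (s.length / 2))
    rw [List.take_append_drop] at hx
    rw [hx, if_pos hany]
  | case3 s h hany ih =>
    rw [goB_deleteFirstLetter]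
    simp only [h, if_false]
    rw [if_neg (by simp [hany]), ih]
    have hx := canon_append (s.take (s.length / 2)) (s.drop (s.length / 2))
    rw [List.take_append_drop] at hx
    rw [hx, if_neg (by simp [hany])]

-- ===== VERDICT (by name: the statement is the Claim_ definition above) =====
theorem deleteFirstLetter_spec : Claim_equal_deleteFirstLetter := by
  intro s _
  unfold Spec_deleteFirstLetter deleteFirstLetter deleteFirstLetter_alt
  rw [goA_canon, goB_canon]
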